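-- pv_equiv track=rewrite | github.com/athena-dai/Zombies-Sim | main.py | borderingZombie
-- ===== SOURCE A (Python) =====
-- def borderingZombie(human, creatureList):
--     for creature in creatureList:
--         if creature[2]=="zombie":
--             #same row, bordering cols
--             if creature[0]==human[0] and \
--                 abs(creature[1]-human[1])==1:
--                     return True
--             #same col, bordering rows
--             elif creature[1]==human[1] and \
--                 abs(creature[0]-human[0])==1:
--                     return True
--     return False
-- ===== SOURCE B (Python) =====
-- def borderingZombie(human, creatureList):
--     # Divide and conquer: a zombie borders the human iff one borders in either half.
--     # A creature borders iff it is a zombie at Manhattan distance exactly 1.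
--     n = len(creatureList)
--     if n == 0:
--         return False
--     if n == 1:
--         c = creatureList[0]
--         return c[2] == "zombie" and abs(c[0] - human[0]) + abs(c[1] - human[1]) == 1
--     mid = n // 2
--     return borderingZombie(human, creatureList[:mid]) or borderingZombie(human, creatureList[mid:])
-- ===== Notes on version B (the rewrite author's own statement) =====
-- stated objective: alternative
-- what changed: Replaces A's linear scan with early exit and two-branch row/column arithmetic by a divide-and-conquer recursion over list halves whose base case tests a single creature with the Manhattan-distance-equals-1 formulation.
import Mathlib
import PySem

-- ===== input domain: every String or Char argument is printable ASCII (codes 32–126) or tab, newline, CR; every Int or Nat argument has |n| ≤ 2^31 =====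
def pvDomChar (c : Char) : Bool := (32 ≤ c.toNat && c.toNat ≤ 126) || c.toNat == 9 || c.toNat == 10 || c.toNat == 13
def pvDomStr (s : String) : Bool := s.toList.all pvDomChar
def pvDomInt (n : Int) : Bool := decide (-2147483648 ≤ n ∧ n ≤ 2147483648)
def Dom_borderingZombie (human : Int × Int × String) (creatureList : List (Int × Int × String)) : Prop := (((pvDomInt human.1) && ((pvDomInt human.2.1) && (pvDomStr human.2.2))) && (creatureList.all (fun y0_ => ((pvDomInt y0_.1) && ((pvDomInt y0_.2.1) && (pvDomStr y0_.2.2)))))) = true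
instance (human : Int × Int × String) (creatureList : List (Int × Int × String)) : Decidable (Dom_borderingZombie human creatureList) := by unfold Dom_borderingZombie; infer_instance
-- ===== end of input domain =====

-- B replaces A's early-exit linear scan with a divide-and-conquer recursion over list halves,
-- testing Manhattan distance = 1 in the single-creature base case (objective: alternative).

-- ===== PORT A =====
def borderingZombie (human : Int × Int × String) (creatureList : List (Int × Int × String)) : Bool :=
  match creatureList with
  | [] => false
  | creature :: rest =>
    if creature.2.2 == "zombie" then
      if creature.1 == human.1 && ((creature.2.1 - human.2.1).natAbs == 1) then true
      else if creature.2.1 == human.2.1 && ((creature.1 - human.1).natAbs == 1) then true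
      else borderingZombie human rest
    else borderingZombie human rest

-- ===== PORT B =====
def borderingZombie_alt (human : Int × Int × String) (creatureList : List (Int × Int × String)) : Bool :=
  if creatureList.length = 0 then false
  else if creatureList.length = 1 then
    match creatureList with
    | c :: _ =>
      c.2.2 == "zombie" && ((c.1 - human.1).natAbs + (c.2.1 - human.2.1).natAbs == 1)
    | [] => false
  else
    -- creatureList[:mid] and creatureList[mid:] with 0 ≤ mid ≤ len are exactly take/drop
    let mid := creatureList.length / 2
    borderingZombie_alt human (creatureList.take mid) || borderingZombie_alt human (creatureList.drop mid)
termination_by creatureList.length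
decreasing_by
  · simp only [List.length_take]; omega
  · simp only [List.length_drop]; omega

-- ===== PRECONDITION & SPEC =====
def Spec_borderingZombie (human : Int × Int × String) (creatureList : List (Int × Int × String)) (out : Bool) : Prop := out = borderingZombie_alt human creatureList
instance (human : Int × Int × String) (creatureList : List (Int × Int × String)) (out : Bool) : Decidable (Spec_borderingZombie human creatureList out) := by unfold Spec_borderingZombie; infer_instance

-- ===== CLAIM (what is proved, stated in full; the proofs are below) =====
def Claim_equal_borderingZombie : Prop := ∀ (human : Int × Int × String) (creatureList : List (Int × Int × String)), Dom_borderingZombie human creatureList → Spec_borderingZombie human creatureList (borderingZombie human creatureList)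

-- ===== LEMMAS AND PROOFS =====

-- the common meaning: some creature in the list is a zombie on an orthogonal neighbor cell
def isBorder (human : Int × Int × String) (c : Int × Int × String) : Prop :=
  c.2.2 = "zombie" ∧ ((c.1 = human.1 ∧ (c.2.1 - human.2.1).natAbs = 1) ∨
                      (c.2.1 = human.2.1 ∧ (c.1 - human.1).natAbs = 1))

theorem portA_iff (human : Int × Int × String) (creatureList : List (Int × Int × String)) :
    borderingZombie human creatureList = true ↔ ∃ c ∈ creatureList, isBorder human c := by
  induction creatureList with
  | nil => simp [borderingZombie]
  | cons c rest ih =>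
    simp only [borderingZombie, isBorder] at *
    split_ifs with h1 h2 h3 <;> simp_all [beq_iff_eq]

theorem portB_iff (human : Int × Int × String) (creatureList : List (Int × Int × String)) :
    borderingZombie_alt human creatureList = true ↔ ∃ c ∈ creatureList, isBorder human c := by
  induction hn : creatureList.length using Nat.strong_induction_on generalizing creatureList with
  | _ n ih =>
    rw [borderingZombie_alt.eq_def]
    by_cases h0 : creatureList.length = 0
    · simp [List.length_eq_zero_iff.mp h0]
    · by_cases h1 : creatureList.length = 1
      · obtain ⟨c, hc⟩ := List.length_eq_one_iff.mp h1
        subst hc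
        simp only [List.length_cons, List.length_nil, Nat.zero_add, isBorder,
          List.mem_cons, List.not_mem_nil, or_false]
        norm_num
        intro _
        omega
      · simp only [h0, h1, if_false]
        rw [Bool.or_eq_true]
        rw [ih _ (by subst hn; simp [List.length_take]; omega) _ rfl,
            ih _ (by subst hn; simp [List.length_drop]; omega) _ rfl]
        constructor
        · rintro (⟨c, hc, hb⟩ | ⟨c, hc, hb⟩)
          · exact ⟨c, List.mem_of_mem_take hc, hb⟩
          · exact ⟨c, List.mem_of_mem_drop hc, hb⟩
        · rintro ⟨c, hc, hb⟩
          rcases (by rw [← List.take_append_drop (creatureList.length / 2) creatureList] at hc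
                     exact List.mem_append.mp hc) with h | h
          · exact Or.inl ⟨c, h, hb⟩
          · exact Or.inr ⟨c, h, hb⟩

-- ===== VERDICT (by name: the statement is the Claim_ definition above) =====
theorem borderingZombie_spec : Claim_equal_borderingZombie := by
  intro human creatureList _
  unfold Spec_borderingZombie
  rw [Bool.eq_iff_iff, portA_iff, portB_iff]
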